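-- pv_equiv track=rewrite | github.com/Vlad-Morariu/SE-Branching-Leaves | main .py | search_item_Price
-- ===== SOURCE A (Python) =====
-- def search_item_Price(a, books):
--     dir = {}
--     for i in books:
--         if a == ("None"):
--             dir.update({i: books[i]})
--         if a == ("<10"):
--             if int(books[i]['Price']) <10:
--                 dir.update({i: books[i]})
--         if a == ("10-20"):
--             if int(books[i]['Price']) >= 10:
--                 if int(books[i]['Price']) < 20:
--                     dir.update({i: books[i]})
--         if a == ("20-30"):
--             if int(books[i]['Price']) >= 20:
--                 if int(books[i]['Price']) < 30:
--                     dir.update({i: books[i]})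
--         if a == ("30-40"):
--             if int(books[i]['Price']) >= 30:
--                 if int(books[i]['Price']) < 40:
--                     dir.update({i: books[i]})
--         if a == ("40-50"):
--             if int(books[i]['Price']) >=40:
--                 if int(books[i]['Price']) < 50:
--                     dir.update({i: books[i]})
--         if a == (">50"):
--             if int(books[i]['Price']) >50:
--                 dir.update({i: books[i]})
--     return dir
-- ===== SOURCE B (Python) =====
-- def _bounds(a):
--     # half-open integer interval [lo, hi); a None bound is unbounded; None result = unknown range
--     return {"<10": (None, 10), "10-20": (10, 20), "20-30": (20, 30),
--             "30-40": (30, 40), "40-50": (40, 50), ">50": (51, None)}.get(a)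
--
-- def _select(items, lo, hi):
--     # divide and conquer over the item list; correct because filtering distributes over concatenation
--     if len(items) <= 1:
--         if not items:
--             return {}
--         k, v = items[0]
--         p = int(v["Price"])
--         if (lo is None or lo <= p) and (hi is None or p < hi):
--             return {k: v}
--         return {}
--     mid = len(items) // 2
--     out = _select(items[:mid], lo, hi)
--     out.update(_select(items[mid:], lo, hi))
--     return out
--
-- def search_item_Price(a, books):
--     if a == "None":
--         return dict(books)
--     b = _bounds(a)
--     if b is None:
--         return {}
--     return _select(list(books.items()), b[0], b[1])
-- ===== Notes on version B (the rewrite author's own statement) =====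
-- stated objective: alternative
-- what changed: Replaces A's single loop with seven inline string-tested branches by (1) translating the range string once into a half-open numeric interval [lo,hi) with optional bounds and (2) a recursive divide-and-conquer selection that splits the item list in half, selects in each half and merges the two sub-results with dict.update.
-- outside the precondition, e.g. on search_item_Price('<10', {'x': {}}): A raises KeyError, B raises KeyError
import Mathlib
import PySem

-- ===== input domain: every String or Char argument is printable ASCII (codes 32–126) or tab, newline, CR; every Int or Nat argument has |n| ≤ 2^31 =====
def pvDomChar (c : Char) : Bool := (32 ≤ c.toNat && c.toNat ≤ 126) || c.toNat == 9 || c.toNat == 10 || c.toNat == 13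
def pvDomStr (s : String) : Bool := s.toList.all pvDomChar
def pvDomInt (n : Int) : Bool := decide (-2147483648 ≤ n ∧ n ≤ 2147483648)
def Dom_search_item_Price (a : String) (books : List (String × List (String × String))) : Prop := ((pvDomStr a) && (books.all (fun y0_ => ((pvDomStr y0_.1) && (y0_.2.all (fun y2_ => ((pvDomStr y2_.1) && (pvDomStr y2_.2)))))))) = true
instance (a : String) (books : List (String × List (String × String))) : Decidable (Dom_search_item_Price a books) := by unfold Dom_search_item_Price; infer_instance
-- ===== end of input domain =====

-- B translates the range string once into a half-open optional-bounds interval and selects by a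
-- recursive divide-and-conquer over the item list merged with dict.update (objective: alternative).


-- shared helper: int(book['Price']) ; the .getD defaults are only reached outside Pre_
def pvPrice (v : List (String × String)) : Int :=
  ((((PySem.Dict.mk v).get? "Price").bind PySem.Int.ofStr?).getD 0)

-- ===== PORT A =====
def search_item_Price (a : String) (books : List (String × List (String × String))) : List (String × List (String × String)) :=
  let bd : PySem.Dict String (List (String × String)) := PySem.Dict.mk books
  -- 'for i in books' iterates the dict's keys; 'books[i]' is the lookup
  let dir := bd.keys.foldl (fun dir i =>
    let v := (bd.get? i).getD []          -- books[i]  (KeyError impossible: i is a key)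
    let p := pvPrice v                    -- int(books[i]['Price']) (raises → excluded by Pre_)
    let dir := if a == "None" then dir.insert i v else dir
    let dir := if a == "<10" then (if p < 10 then dir.insert i v else dir) else dir
    let dir := if a == "10-20" then (if 10 ≤ p then (if p < 20 then dir.insert i v else dir) else dir) else dir
    let dir := if a == "20-30" then (if 20 ≤ p then (if p < 30 then dir.insert i v else dir) else dir) else dir
    let dir := if a == "30-40" then (if 30 ≤ p then (if p < 40 then dir.insert i v else dir) else dir) else dir
    let dir := if a == "40-50" then (if 40 ≤ p then (if p < 50 then dir.insert i v else dir) else dir) else dir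
    let dir := if a == ">50" then (if 50 < p then dir.insert i v else dir) else dir
    dir) PySem.Dict.empty
  dir.items

-- ===== PORT B =====
-- _bounds: the range string as a half-open interval [lo, hi); none bound = unbounded
def pvBounds (a : String) : Option (Option Int × Option Int) :=
  (PySem.Dict.mk
    [ ("<10",   ((none : Option Int), (some 10 : Option Int))),
      ("10-20", (some 10, some 20)),
      ("20-30", (some 20, some 30)),
      ("30-40", (some 30, some 40)),
      ("40-50", (some 40, some 50)),
      (">50",   (some 51, none)) ]).get? a

-- interval membership test used at the leaves of _select
def pvInBounds (lo hi : Option Int) (p : Int) : Bool :=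
  (match lo with | none => true | some l => decide (l ≤ p)) &&
  (match hi with | none => true | some h => decide (p < h))

-- _select: divide and conquer over the item list, merging with dict.update
def pvSelect (items : List (String × List (String × String))) (lo hi : Option Int) :
    PySem.Dict String (List (String × String)) :=
  if items.length ≤ 1 then
    match items with
    | [] => PySem.Dict.empty
    | (k, v) :: _ =>
      if pvInBounds lo hi (pvPrice v) then PySem.Dict.mk [(k, v)] else PySem.Dict.empty
  else
    -- items[:mid] / items[mid:] with 0 ≤ mid ≤ len are exactly take/drop
    let mid := items.length / 2
    (pvSelect (items.take mid) lo hi).update ((pvSelect (items.drop mid) lo hi).items)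
termination_by items.length
decreasing_by
  · simp; omega
  · simp; omega

def search_item_Price_alt (a : String) (books : List (String × List (String × String))) : List (String × List (String × String)) :=
  if a == "None" then books
  else
    match pvBounds a with
    | none => []
    | some (lo, hi) => (pvSelect books lo hi).items

-- ===== PRECONDITION & SPEC =====
-- Pre_ excludes (a) inputs where A raises: a price-range selector together with a book whose
-- 'Price' entry is missing or not int()-parseable (KeyError/ValueError), and (b) association
-- lists with duplicate keys (outer or within a book), which do not denote a Python dict.
def Pre_search_item_Price (a : String) (books : List (String × List (String × String))) : Prop :=
  (books.map Prod.fst).Nodup ∧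
  (∀ kv ∈ books, (kv.2.map Prod.fst).Nodup) ∧
  ((a = "<10" ∨ a = "10-20" ∨ a = "20-30" ∨ a = "30-40" ∨ a = "40-50" ∨ a = ">50") →
    ∀ kv ∈ books, (((PySem.Dict.mk kv.2).get? "Price").bind PySem.Int.ofStr?).isSome = true)
instance (a : String) (books : List (String × List (String × String))) : Decidable (Pre_search_item_Price a books) := by unfold Pre_search_item_Price; infer_instance

def pvWitness_search_item_Price : String × (List (String × List (String × String))) :=
  ("10-20", [("b1", [("Price", "15")]), ("b2", [("Price", "42")])])

def Spec_search_item_Price (a : String) (books : List (String × List (String × String))) (out : List (String × List (String × String))) : Prop := out = search_item_Price_alt a books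
instance (a : String) (books : List (String × List (String × String))) (out : List (String × List (String × String))) : Decidable (Spec_search_item_Price a books out) := by unfold Spec_search_item_Price; infer_instance

-- ===== CLAIM =====
def Claim_equal_search_item_Price : Prop := ∀ (a : String) (books : List (String × List (String × String))), Dom_search_item_Price a books → Pre_search_item_Price a books → Spec_search_item_Price a books (search_item_Price a books)

-- ===== LEMMAS AND PROOFS =====

-- keys-filter-then-rebuild equals a direct filter of the association list, given pointwise lookup
lemma pv_map_filter_keys (cond : Int → Bool) (f : String → List (String × String)) :
    ∀ (l : List (String × List (String × String))), (∀ kv ∈ l, f kv.1 = kv.2) →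
    ((l.map Prod.fst).filter (fun i => cond (pvPrice (f i)))).map (fun i => (i, f i))
      = l.filter (fun kv => cond (pvPrice kv.2)) := by
  intro l
  induction l with
  | nil => intro _; rfl
  | cons kv rest ih =>
    intro h
    have hkv : f kv.1 = kv.2 := h kv (by simp)
    have hrest := ih (fun x hx => h x (by simp [hx]))
    by_cases hc : cond (pvPrice kv.2) = true <;>
      simp [hkv, hc, hrest]

-- A's conditional-insert loop over the keys of a nodup-key dict is a filter of the list
lemma pv_coreA (books : List (String × List (String × String))) (cond : Int → Bool)
    (hnd : (books.map Prod.fst).Nodup) :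
    ((books.map Prod.fst).foldl
        (fun dir i =>
          if cond (pvPrice (((PySem.Dict.mk books).get? i).getD []))
          then dir.insert i (((PySem.Dict.mk books).get? i).getD []) else dir)
        PySem.Dict.empty).items
      = books.filter (fun kv => cond (pvPrice kv.2)) := by
  rw [PySem.List.foldl_if_eq_foldl_filter]
  rw [PySem.Dict.items_foldl_insert_fresh _ (fun i => i)
        (fun i => ((PySem.Dict.mk books).get? i).getD []) PySem.Dict.empty
        (by intro x _; exact PySem.Dict.contains_empty x)
        (by simpa using hnd.filter _)]
  have hlook : ∀ kv ∈ books, ((PySem.Dict.mk books).get? kv.1).getD [] = kv.2 := by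
    intro kv hkv
    have : (PySem.Dict.mk books).get? kv.1 = some kv.2 := by
      apply PySem.Dict.get?_of_mem_items
      · simpa [PySem.Dict.items] using hkv
      · simpa [PySem.Dict.keys, PySem.Dict.items] using hnd
    simp [this]
  simpa [PySem.Dict.empty, PySem.Dict.items] using
    pv_map_filter_keys cond (fun i => ((PySem.Dict.mk books).get? i).getD []) books hlook

-- B's divide-and-conquer select on a nodup-key item list is the same filter
lemma pv_coreB (lo hi : Option Int) :
    ∀ (items : List (String × List (String × String))), (items.map Prod.fst).Nodup →
    (pvSelect items lo hi).items = items.filter (fun kv => pvInBounds lo hi (pvPrice kv.2)) := by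
  intro items
  induction items using pvSelect.induct (lo := lo) (hi := hi)
  all_goals intro hnd
  · simp [pvSelect, PySem.Dict.empty]
  · next k v tail hb hlen =>
    have htail : tail = [] := by cases tail with | nil => rfl | cons x xs => simp at hlen
    subst htail
    simp [pvSelect, hb]
  · next k v tail hb hlen =>
    have htail : tail = [] := by cases tail with | nil => rfl | cons x xs => simp at hlen
    subst htail
    simp [pvSelect, hb, PySem.Dict.empty]
  · next its hlen mid ihL ihR =>
    have hndL : (List.map Prod.fst (its.take mid)).Nodup :=
      hnd.sublist ((List.take_sublist _ _).map _)
    have hndR : (List.map Prod.fst (its.drop mid)).Nodup :=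
      hnd.sublist ((List.drop_sublist _ _).map _)
    have hnd2 : ((its.take mid).map Prod.fst ++ (its.drop mid).map Prod.fst).Nodup := by
      rw [← List.map_append, List.take_append_drop]; exact hnd
    rw [List.nodup_append] at hnd2
    obtain ⟨-, -, hdisj⟩ := hnd2
    have hfresh : ∀ a ∈ (its.drop mid).filter
        (fun kv => pvInBounds lo hi (pvPrice kv.2)),
        (pvSelect (its.take mid) lo hi).contains a.1 = false := by
      intro x hx
      rw [← Bool.not_eq_true, PySem.Dict.contains_iff_mem_keys]
      simp only [PySem.Dict.keys, ihL hndL]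
      intro hmem
      have hL : x.1 ∈ (its.take mid).map Prod.fst :=
        ((List.filter_sublist).map _).mem hmem
      have hR : x.1 ∈ (its.drop mid).map Prod.fst :=
        List.mem_map_of_mem (List.mem_of_mem_filter hx)
      exact hdisj _ hL _ hR rfl
    have hndF : (((its.drop mid).filter
        (fun kv => pvInBounds lo hi (pvPrice kv.2))).map Prod.fst).Nodup :=
      hndR.sublist ((List.filter_sublist).map _)
    have hupd : ∀ (d : PySem.Dict String (List (String × String)))
        (l : List (String × List (String × String))),
        d.update l = l.foldl (fun d p => d.insert p.1 p.2) d := fun _ _ => rfl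
    rw [pvSelect.eq_def]
    simp only [if_neg hlen]
    rw [hupd, ihR hndR,
        PySem.Dict.items_foldl_insert_fresh _ Prod.fst Prod.snd _ hfresh hndF,
        ihL hndL]
    conv_rhs => rw [← List.take_append_drop mid its, List.filter_append]
    simp

-- ===== VERDICT =====
theorem search_item_Price_spec : Claim_equal_search_item_Price := by
  intro a books _ hpre
  obtain ⟨hnd, -, -⟩ := hpre
  unfold Spec_search_item_Price search_item_Price search_item_Price_alt
  simp only [PySem.Dict.keys]
  by_cases h0 : a = "None"
  · subst h0
    simp only [beq_self_eq_true, if_true]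
    have := pv_coreA books (fun _ => true) hnd
    simpa using this
  by_cases h1 : a = "<10"
  · subst h1
    have hA := pv_coreA books (fun p => decide (p < 10)) hnd
    have hB := pv_coreB none (some 10) books hnd
    simp_all [pvBounds, pvInBounds, PySem.Dict.get?_mk_cons]
  by_cases h2 : a = "10-20"
  · subst h2
    have hA := pv_coreA books (fun p => decide (10 ≤ p) && decide (p < 20)) hnd
    have hB := pv_coreB (some 10) (some 20) books hnd
    simp_all [pvBounds, pvInBounds, PySem.Dict.get?_mk_cons, ite_and]
  by_cases h3 : a = "20-30"
  · subst h3
    have hA := pv_coreA books (fun p => decide (20 ≤ p) && decide (p < 30)) hnd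
    have hB := pv_coreB (some 20) (some 30) books hnd
    simp_all [pvBounds, pvInBounds, PySem.Dict.get?_mk_cons, ite_and]
  by_cases h4 : a = "30-40"
  · subst h4
    have hA := pv_coreA books (fun p => decide (30 ≤ p) && decide (p < 40)) hnd
    have hB := pv_coreB (some 30) (some 40) books hnd
    simp_all [pvBounds, pvInBounds, PySem.Dict.get?_mk_cons, ite_and]
  by_cases h5 : a = "40-50"
  · subst h5
    have hA := pv_coreA books (fun p => decide (40 ≤ p) && decide (p < 50)) hnd
    have hB := pv_coreB (some 40) (some 50) books hnd
    simp_all [pvBounds, pvInBounds, PySem.Dict.get?_mk_cons, ite_and]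
  by_cases h6 : a = ">50"
  · subst h6
    have hA := pv_coreA books (fun p => decide (50 < p)) hnd
    have hB := pv_coreB (some 51) none books hnd
    have : ∀ p : Int, decide (51 ≤ p) = decide (50 < p) := by intro p; simp; omega
    simp_all [pvBounds, pvInBounds, PySem.Dict.get?_mk_cons]
  · have g0 : (a == "None") = false := beq_eq_false_iff_ne.mpr h0
    have g1 : (a == "<10") = false := beq_eq_false_iff_ne.mpr h1
    have g2 : (a == "10-20") = false := beq_eq_false_iff_ne.mpr h2
    have g3 : (a == "20-30") = false := beq_eq_false_iff_ne.mpr h3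
    have g4 : (a == "30-40") = false := beq_eq_false_iff_ne.mpr h4
    have g5 : (a == "40-50") = false := beq_eq_false_iff_ne.mpr h5
    have g6 : (a == ">50") = false := beq_eq_false_iff_ne.mpr h6
    have f1 : (("<10" : String) == a) = false := beq_eq_false_iff_ne.mpr (Ne.symm h1)
    have f2 : (("10-20" : String) == a) = false := beq_eq_false_iff_ne.mpr (Ne.symm h2)
    have f3 : (("20-30" : String) == a) = false := beq_eq_false_iff_ne.mpr (Ne.symm h3)
    have f4 : (("30-40" : String) == a) = false := beq_eq_false_iff_ne.mpr (Ne.symm h4)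
    have f5 : (("40-50" : String) == a) = false := beq_eq_false_iff_ne.mpr (Ne.symm h5)
    have f6 : ((">50" : String) == a) = false := beq_eq_false_iff_ne.mpr (Ne.symm h6)
    have hz := pv_coreA books (fun _ => false) hnd
    simp only [g0, g1, g2, g3, g4, g5, g6, if_false, Bool.false_eq_true] at *
    simp [pvBounds, f1, f2, f3, f4, f5, f6, PySem.Dict.get?, PySem.Dict.empty]
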